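-- pv_equiv track=rewrite | github.com/pixeeplay/nus-odoo18 | code2asin/models/image_import_helper.py | parse_image_urls
-- ===== SOURCE A (Python) =====
-- def parse_image_urls(images_string):
--     """Parse une chaîne d'URLs d'images séparées par des virgules, points-virgules ou espaces."""
--     if not images_string or not images_string.strip():
--         return []
--
--     # Séparer par différents délimiteurs possibles
--     separators = [',', ';', '\n', '\r\n', '|']
--     urls = [images_string.strip()]
--
--     for separator in separators:
--         new_urls = []
--         for url in urls:
--             new_urls.extend([u.strip() for u in url.split(separator) if u.strip()])
--         urls = new_urls
--
--     # Filtrer les URLs valides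
--     valid_urls = []
--     for url in urls:
--         if url and url.startswith(('http://', 'https://')):
--             valid_urls.append(url)
--
--     return valid_urls[:10]  # Limiter à 10 images maximum
-- ===== SOURCE B (Python) =====
-- def parse_image_urls(images_string):
--     """Single-pass scanner: walk the string once, flushing a token at each
--     delimiter, instead of five sequential split passes."""
--     if not images_string:
--         return []
--     out = []
--     tok = []
--     for ch in images_string + ',':
--         if ch in ',;|\n':
--             t = ''.join(tok).strip()
--             tok = []
--             if (t.startswith('http://') or t.startswith('https://')) and len(out) < 10:
--                 out.append(t)
--         else:
--             tok.append(ch)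
--     return out
-- ===== Notes on version B (the rewrite author's own statement) =====
-- stated objective: alternative
-- what changed: Replaces A's five sequential split-strip-filter passes (each rebuilding the whole token list) by a single left-to-right character scan that flushes, strips and filters a token at each delimiter and stops collecting after 10 URLs.
import Mathlib
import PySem

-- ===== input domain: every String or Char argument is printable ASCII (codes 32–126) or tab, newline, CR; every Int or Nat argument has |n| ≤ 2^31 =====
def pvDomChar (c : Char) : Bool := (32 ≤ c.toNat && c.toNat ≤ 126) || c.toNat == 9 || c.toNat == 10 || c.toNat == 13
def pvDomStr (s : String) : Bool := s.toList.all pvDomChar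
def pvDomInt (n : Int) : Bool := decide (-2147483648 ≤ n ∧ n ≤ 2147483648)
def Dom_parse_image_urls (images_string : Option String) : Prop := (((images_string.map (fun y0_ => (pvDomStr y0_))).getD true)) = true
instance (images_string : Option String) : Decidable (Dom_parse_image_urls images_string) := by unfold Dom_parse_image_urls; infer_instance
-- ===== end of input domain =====

-- B replaces A's five sequential split/strip/filter passes by one left-to-right
-- character scan that flushes, strips and filters one token at each delimiter
-- (objective: a genuinely different single-pass decomposition; same results).

-- ===== PORT A =====
def parse_image_urls (images_string : Option String) : List String :=
  match images_string with
  | none => []                                    -- `not images_string` (None is falsy)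
  | some s =>
    if s.toList = [] ∨ PySem.Chars.strip s.toList = [] then []  -- `not images_string or not images_string.strip()`
    else
      let separators : List (List Char) := [[','], [';'], ['\n'], ['\r', '\n'], ['|']]
      let urls0 : List (List Char) := [PySem.Chars.strip s.toList]
      let urls := separators.foldl
        (fun urls sep =>
          urls.foldl
            (fun new_urls url =>
              new_urls ++ (((PySem.Chars.splitOn url sep).map PySem.Chars.strip).filter (fun u => u ≠ [])))
            [])
        urls0
      let valid_urls := urls.foldl
        (fun acc url =>
          if (!url.isEmpty && (PySem.Chars.startswith url "http://".toList
                || PySem.Chars.startswith url "https://".toList)) = true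
          then acc ++ [url] else acc)
        []
      (PySem.List.slice valid_urls none (some 10)).map String.ofList

-- ===== PORT B =====
-- scanner loop of Source B: one pass; `tok` is the pending token, `out` the URLs kept so far
def pyScanTokB : List Char → List Char → List String → List String
  | [], _tok, out => out
  | c :: rest, tok, out =>
    if c = ',' ∨ c = ';' ∨ c = '|' ∨ c = '\n' then
      let t := PySem.Chars.strip tok
      pyScanTokB rest []
        (if (PySem.Chars.startswith t "http://".toList
              || PySem.Chars.startswith t "https://".toList) = true ∧ out.length < 10
         then out ++ [String.ofList t] else out)
    else
      pyScanTokB rest (tok ++ [c]) out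

def parse_image_urls_alt (images_string : Option String) : List String :=
  match images_string with
  | none => []
  | some s =>
    if s.toList = [] then []                      -- `if not images_string`
    else pyScanTokB (s.toList ++ [',']) [] []     -- `for ch in images_string + ','`

-- ===== PRECONDITION & SPEC =====
def Spec_parse_image_urls (images_string : Option String) (out : List String) : Prop := out = parse_image_urls_alt images_string
instance (images_string : Option String) (out : List String) : Decidable (Spec_parse_image_urls images_string out) := by unfold Spec_parse_image_urls; infer_instance

-- ===== CLAIM (what is proved, stated in full; the proofs are below) =====
def Claim_equal_parse_image_urls : Prop := ∀ (images_string : Option String), Dom_parse_image_urls images_string → Spec_parse_image_urls images_string (parse_image_urls images_string)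

-- ===== LEMMAS AND PROOFS =====

-- proof-side abbreviations
def pvDelim (c : Char) : Bool := c == ',' || c == ';' || c == '\n' || c == '|'

def pvValid (t : List Char) : Bool :=
  PySem.Chars.startswith t "http://".toList || PySem.Chars.startswith t "https://".toList

def pvSF (ts : List (List Char)) : List (List Char) :=
  (ts.map PySem.Chars.strip).filter (fun u => u ≠ [])

def pvStage (p : Char → Bool) (ts : List (List Char)) : List (List Char) :=
  ts.flatMap (fun u => pvSF (List.splitOnP p u))

-- the common canonical value both programs compute (for `some s`, s nonempty)
def pvCanon (l : List Char) : List String :=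
  ((((List.splitOnP pvDelim l).map PySem.Chars.strip).filter pvValid).take 10).map String.ofList

-- ---- generic splitOnP facts ----
theorem pv_splitOnP_ne_nil {α : Type} (p : α → Bool) (l : List α) : List.splitOnP p l ≠ [] := by
  induction l with
  | nil => simp [List.splitOnP_nil]
  | cons a l ih =>
    rw [List.splitOnP_cons]
    split
    · simp
    · cases h : List.splitOnP p l with
      | nil => exact absurd h ih
      | cons x t => simp

theorem pv_mem_splitOnP {α : Type} (p : α → Bool) (l : List α) :
    ∀ x ∈ List.splitOnP p l, ∀ c ∈ x, c ∈ l ∧ p c = false := by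
  induction l with
  | nil =>
    intro x hx c hc
    simp [List.splitOnP_nil] at hx
    subst hx; simp at hc
  | cons a l ih =>
    intro x hx c hc
    rw [List.splitOnP_cons] at hx
    by_cases hp : p a = true
    · rw [if_pos hp] at hx
      rcases List.mem_cons.mp hx with h | h
      · subst h; simp at hc
      · obtain ⟨h1, h2⟩ := ih x h c hc
        exact ⟨List.mem_cons_of_mem _ h1, h2⟩
    · rw [if_neg hp] at hx
      cases hS : List.splitOnP p l with
      | nil => exact absurd hS (pv_splitOnP_ne_nil p l)
      | cons y t =>
        rw [hS, List.modifyHead_cons] at hx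
        rcases List.mem_cons.mp hx with h | h
        · subst h
          rcases List.mem_cons.mp hc with h | h
          · subst h
            exact ⟨by simp, Bool.eq_false_iff.mpr hp⟩
          · obtain ⟨h1, h2⟩ := ih y (by rw [hS]; simp) c h
            exact ⟨List.mem_cons_of_mem _ h1, h2⟩
        · obtain ⟨h1, h2⟩ := ih x (by rw [hS]; exact List.mem_cons_of_mem _ h) c hc
          exact ⟨List.mem_cons_of_mem _ h1, h2⟩

theorem pv_splitOnP_merge {α : Type} (q p : α → Bool) (l : List α) :
    (List.splitOnP q l).flatMap (List.splitOnP p) = List.splitOnP (fun c => q c || p c) l := by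
  induction l with
  | nil => simp [List.splitOnP_nil]
  | cons a l ih =>
    rw [List.splitOnP_cons q, List.splitOnP_cons (fun c => q c || p c)]
    by_cases hq : q a = true
    · rw [if_pos hq, if_pos (by simp [hq]), List.flatMap_cons, List.splitOnP_nil, ← ih]
      rfl
    · cases hS : List.splitOnP q l with
      | nil => exact absurd hS (pv_splitOnP_ne_nil q l)
      | cons h t =>
        have hih : List.splitOnP (fun c => q c || p c) l = List.splitOnP p h ++ t.flatMap (List.splitOnP p) := by
          rw [← ih, hS, List.flatMap_cons]
        rw [if_neg hq, List.modifyHead_cons, List.flatMap_cons, List.splitOnP_cons]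
        by_cases hp : p a = true
        · rw [if_pos hp, if_pos (by simp [hq, hp]), hih]
          rfl
        · rw [if_neg hp, if_neg (by simp [hq, hp]), hih]
          cases hH : List.splitOnP p h with
          | nil => exact absurd hH (pv_splitOnP_ne_nil p h)
          | cons y ys => simp

theorem pv_splitOnP_no_delim {α : Type} (p : α → Bool) (v : List α) (h : ∀ c ∈ v, p c = false) :
    List.splitOnP p v = [v] := by
  induction v with
  | nil => simp [List.splitOnP_nil]
  | cons c v ih =>
    rw [List.splitOnP_cons, if_neg (by simp [h c (by simp)]),
        ih (fun x hx => h x (List.mem_cons_of_mem _ hx)), List.modifyHead_cons]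

theorem pv_splitOnP_append_delim {α : Type} (p : α → Bool) (v w : List α) (c : α)
    (hv : ∀ x ∈ v, p x = false) (hc : p c = true) :
    List.splitOnP p (v ++ c :: w) = v :: List.splitOnP p w := by
  induction v with
  | nil => rw [List.nil_append, List.splitOnP_cons, if_pos hc]
  | cons x v ih =>
    rw [List.cons_append, List.splitOnP_cons, if_neg (by simp [hv x (by simp)]),
        ih (fun y hy => hv y (List.mem_cons_of_mem _ hy)), List.modifyHead_cons]

theorem pv_splitOnP_concat {α : Type} (p : α → Bool) (v : List α) (a : α) :
    List.splitOnP p (v ++ [a]) =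
      if p a = true then List.splitOnP p v ++ [[]]
      else (List.splitOnP p v).dropLast ++ [(List.splitOnP p v).getLastD [] ++ [a]] := by
  induction v with
  | nil =>
    rw [List.nil_append, List.splitOnP_cons, List.splitOnP_nil]
    by_cases ha : p a = true
    · simp [ha]
    · simp [ha]
  | cons b v ih =>
    rw [List.cons_append, List.splitOnP_cons, List.splitOnP_cons (xs := v), ih]
    by_cases hb : p b = true
    · rw [if_pos hb, if_pos hb]
      by_cases ha : p a = true
      · rw [if_pos ha, if_pos ha]
        rfl
      · rw [if_neg ha, if_neg ha]
        cases hS : List.splitOnP p v with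
        | nil => exact absurd hS (pv_splitOnP_ne_nil p v)
        | cons x xs => simp
    · rw [if_neg hb, if_neg hb]
      cases hS : List.splitOnP p v with
      | nil => exact absurd hS (pv_splitOnP_ne_nil p v)
      | cons x xs =>
        by_cases ha : p a = true
        · rw [if_pos ha, if_pos ha, List.modifyHead_cons]
          simp
        · rw [if_neg ha, if_neg ha]
          cases xs with
          | nil => simp
          | cons y ys => simp

-- ---- strip facts ----
theorem pv_strip_nil : PySem.Chars.strip [] = [] := by decide

theorem pv_strip_cons_ws (a : Char) (x : List Char) (h : PySem.Chars.isspace a = true) :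
    PySem.Chars.strip (a :: x) = PySem.Chars.strip x := by
  simp [PySem.Chars.strip, PySem.Chars.lstrip, h]

theorem pv_rstrip_concat_ws (a : Char) (x : List Char) (h : PySem.Chars.isspace a = true) :
    PySem.Chars.rstrip (x ++ [a]) = PySem.Chars.rstrip x := by
  simp [PySem.Chars.rstrip, h]

theorem pv_strip_concat_ws (a : Char) (x : List Char) (h : PySem.Chars.isspace a = true) :
    PySem.Chars.strip (x ++ [a]) = PySem.Chars.strip x := by
  unfold PySem.Chars.strip PySem.Chars.lstrip
  rw [List.dropWhile_append]
  by_cases he : (List.dropWhile PySem.Chars.isspace x).isEmpty = true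
  · rw [if_pos he]
    rw [List.isEmpty_iff] at he
    rw [he]
    simp [h]
  · rw [if_neg he]
    exact pv_rstrip_concat_ws a _ h

theorem pv_strip_eq_nil (x : List Char) (h : ∀ c ∈ x, PySem.Chars.isspace c = true) :
    PySem.Chars.strip x = [] := by
  unfold PySem.Chars.strip PySem.Chars.lstrip
  have : List.dropWhile PySem.Chars.isspace x = [] := List.dropWhile_eq_nil_iff.mpr h
  rw [this]
  rfl

theorem pv_mem_strip (x : List Char) (c : Char) (h : c ∈ PySem.Chars.strip x) : c ∈ x := by
  unfold PySem.Chars.strip PySem.Chars.rstrip PySem.Chars.lstrip at h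
  rw [List.mem_reverse] at h
  have h1 := (List.dropWhile_sublist _).subset h
  rw [List.mem_reverse] at h1
  exact (List.dropWhile_sublist _).subset h1

theorem pv_rstrip_decomp (y : List Char) :
    (∀ c ∈ (List.takeWhile PySem.Chars.isspace y.reverse).reverse, PySem.Chars.isspace c = true) ∧
      y = PySem.Chars.rstrip y ++ (List.takeWhile PySem.Chars.isspace y.reverse).reverse := by
  constructor
  · intro c hc
    rw [List.mem_reverse] at hc
    exact List.mem_takeWhile_imp hc
  · conv_lhs => rw [← List.reverse_reverse y,
      ← List.takeWhile_append_dropWhile (p := PySem.Chars.isspace) (l := y.reverse)]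
    rw [List.reverse_append]
    rfl

theorem pv_strip_decomp (x : List Char) :
    ∃ w₁ w₂, (∀ c ∈ w₁, PySem.Chars.isspace c = true) ∧ (∀ c ∈ w₂, PySem.Chars.isspace c = true) ∧
      x = w₁ ++ PySem.Chars.strip x ++ w₂ := by
  refine ⟨List.takeWhile PySem.Chars.isspace x,
    (List.takeWhile PySem.Chars.isspace (PySem.Chars.lstrip x).reverse).reverse,
    fun c hc => List.mem_takeWhile_imp hc, (pv_rstrip_decomp (PySem.Chars.lstrip x)).1, ?_⟩
  conv_lhs => rw [← List.takeWhile_append_dropWhile (p := PySem.Chars.isspace) (l := x)]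
  rw [List.append_assoc]
  congr 1
  exact (pv_rstrip_decomp (PySem.Chars.lstrip x)).2

theorem pv_rstrip_idem (y : List Char) :
    PySem.Chars.rstrip (PySem.Chars.rstrip y) = PySem.Chars.rstrip y := by
  unfold PySem.Chars.rstrip
  rw [List.reverse_reverse, List.dropWhile_idempotent]

theorem pv_strip_idem (x : List Char) :
    PySem.Chars.strip (PySem.Chars.strip x) = PySem.Chars.strip x := by
  unfold PySem.Chars.strip
  have h1 : PySem.Chars.lstrip (PySem.Chars.rstrip (PySem.Chars.lstrip x)) =
      PySem.Chars.rstrip (PySem.Chars.lstrip x) := by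
    cases hr : PySem.Chars.rstrip (PySem.Chars.lstrip x) with
    | nil => rfl
    | cons c z =>
      have hdec := (pv_rstrip_decomp (PySem.Chars.lstrip x)).2
      rw [hr] at hdec
      have hc : PySem.Chars.isspace c = false := by
        by_contra hcc
        rw [Bool.not_eq_false] at hcc
        have hthis : PySem.Chars.lstrip (PySem.Chars.lstrip x) = PySem.Chars.lstrip x := by
          unfold PySem.Chars.lstrip
          exact List.dropWhile_idempotent _ _
        rw [hdec] at hthis
        unfold PySem.Chars.lstrip at hthis
        rw [List.cons_append, List.dropWhile_cons, if_pos hcc] at hthis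
        have hle := List.length_dropWhile_le (p := PySem.Chars.isspace)
          (l := z ++ (List.takeWhile PySem.Chars.isspace (List.dropWhile PySem.Chars.isspace x).reverse).reverse)
        rw [hthis, List.length_cons] at hle
        omega
      unfold PySem.Chars.lstrip
      rw [List.dropWhile_cons, if_neg (by simp [hc])]
  rw [h1, pv_rstrip_idem]

theorem pv_all_ws_of_strip_nil (x : List Char) (h : PySem.Chars.strip x = []) :
    ∀ c ∈ x, PySem.Chars.isspace c = true := by
  obtain ⟨w₁, w₂, h₁, h₂, hx⟩ := pv_strip_decomp x
  rw [h] at hx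
  intro c hc
  rw [hx] at hc
  simp at hc
  rcases hc with h' | h'
  exacts [h₁ c h', h₂ c h']

-- ---- pvSF facts ----
theorem pv_SF_append (a b : List (List Char)) : pvSF (a ++ b) = pvSF a ++ pvSF b := by
  simp [pvSF]

theorem pv_SF_flatMap {α : Type} (f : α → List (List Char)) (ts : List α) :
    (ts.flatMap fun u => pvSF (f u)) = pvSF (ts.flatMap f) := by
  induction ts with
  | nil => simp [pvSF]
  | cons t ts ih => simp only [List.flatMap_cons, pv_SF_append, ih]

theorem pv_dropLast_getLastD {α : Type} (l : List (List α)) (h : l ≠ []) :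
    l.dropLast ++ [l.getLastD []] = l := by
  induction l with
  | nil => exact absurd rfl h
  | cons x xs ih =>
    cases xs with
    | nil => rfl
    | cons y ys =>
      rw [List.dropLast_cons₂, List.cons_append]
      have hg : List.getLastD (x :: y :: ys) [] = List.getLastD (y :: ys) [] := by
        simp
      rw [hg, ih (by simp)]

theorem pv_SF_split_leading_ws (p : Char → Bool) (w : List Char) :
    ∀ v : List Char, (∀ c ∈ w, PySem.Chars.isspace c = true) →
      pvSF (List.splitOnP p (w ++ v)) = pvSF (List.splitOnP p v) := by
  induction w with
  | nil => intro v _; rw [List.nil_append]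
  | cons a w ih =>
    intro v hw
    have ha := hw a (by simp)
    have hw' : ∀ c ∈ w, PySem.Chars.isspace c = true := fun c hc => hw c (by simp [hc])
    rw [List.cons_append, List.splitOnP_cons]
    by_cases hp : p a = true
    · rw [if_pos hp]
      have hnil : pvSF ([] :: List.splitOnP p (w ++ v)) = pvSF (List.splitOnP p (w ++ v)) := by
        simp [pvSF, pv_strip_nil]
      rw [hnil, ih v hw']
    · rw [if_neg hp]
      cases hS : List.splitOnP p (w ++ v) with
      | nil => exact absurd hS (pv_splitOnP_ne_nil _ _)
      | cons h t =>
        rw [List.modifyHead_cons, ← ih v hw', hS]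
        simp [pvSF, pv_strip_cons_ws a h ha]

theorem pv_SF_split_trailing_ws (p : Char → Bool) (v : List Char) :
    ∀ w : List Char, (∀ c ∈ w, PySem.Chars.isspace c = true) →
      pvSF (List.splitOnP p (v ++ w)) = pvSF (List.splitOnP p v) := by
  intro w
  induction w using List.reverseRecOn with
  | nil => intro _; rw [List.append_nil]
  | append_singleton w a ih =>
    intro hw
    have ha := hw a (by simp)
    have hw' : ∀ c ∈ w, PySem.Chars.isspace c = true := fun c hc => hw c (by simp [hc])
    rw [← List.append_assoc, pv_splitOnP_concat]
    by_cases hp : p a = true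
    · rw [if_pos hp, pv_SF_append]
      have hnil : pvSF [([] : List Char)] = [] := by simp [pvSF, pv_strip_nil]
      rw [hnil, List.append_nil, ih hw']
    · rw [if_neg hp]
      cases hS : List.splitOnP p (v ++ w) with
      | nil => exact absurd hS (pv_splitOnP_ne_nil _ _)
      | cons x xs =>
        rw [← ih hw', hS, pv_SF_append]
        conv_rhs => rw [← pv_dropLast_getLastD (x :: xs) (by simp), pv_SF_append]
        congr 1
        simp [pvSF, pv_strip_concat_ws a _ ha]

theorem pv_SF_split_strip (p : Char → Bool) (u : List Char) :
    pvSF (List.splitOnP p (PySem.Chars.strip u)) = pvSF (List.splitOnP p u) := by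
  obtain ⟨w₁, w₂, h₁, h₂, hx⟩ := pv_strip_decomp u
  conv_rhs => rw [hx]
  rw [List.append_assoc, pv_SF_split_leading_ws p w₁ _ h₁, pv_SF_split_trailing_ws p _ w₂ h₂]

-- ---- stage lemmas ----
theorem pv_flatMap_filter {α β : Type} (q : α → Bool) (g : α → List β) (xs : List α)
    (h : ∀ x, q x = false → g x = []) : (xs.filter q).flatMap g = xs.flatMap g := by
  induction xs with
  | nil => rfl
  | cons x xs ih =>
    rw [List.filter_cons]
    by_cases hq : q x = true
    · rw [if_pos hq, List.flatMap_cons, List.flatMap_cons, ih]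
    · rw [if_neg (by simp [hq]), List.flatMap_cons, h x (Bool.eq_false_iff.mpr hq),
          List.nil_append, ih]

theorem pv_stage_combined (Q p R : Char → Bool) (hR : ∀ c, R c = (Q c || p c)) (l : List Char) :
    pvStage p (pvSF (List.splitOnP Q l)) = pvSF (List.splitOnP R l) := by
  have hRf : R = fun c => Q c || p c := funext hR
  unfold pvStage
  have hfil : pvSF (List.splitOnP Q l) =
      ((List.splitOnP Q l).map PySem.Chars.strip).filter (fun u => u ≠ []) := rfl
  rw [hfil, pv_flatMap_filter _ _ _ (by
    intro x hx
    simp only [decide_not] at hx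
    have : x = [] := by simpa using hx
    subst this
    simp [pvSF, List.splitOnP_nil, pv_strip_nil]), List.flatMap_map]
  have hcomp : (fun a => pvSF (List.splitOnP p (PySem.Chars.strip a))) =
      fun u => pvSF (List.splitOnP p u) := by
    funext u
    exact pv_SF_split_strip p u
  rw [hcomp, pv_SF_flatMap, pv_splitOnP_merge, hRf]

-- ---- PySem.Chars.splitOn characterisations ----
theorem pv_modifyHead_id {α : Type} (l : List α) : List.modifyHead (fun h => h) l = l := by
  cases l <;> rfl

theorem pv_go_single (d : Char) (fuel : Nat) :
    ∀ (l cur : List Char) (acc : List (List Char)), l.length < fuel →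
      PySem.Chars.splitOn.go [d] fuel l cur acc =
        acc.reverse ++ (List.splitOnP (fun c => c == d) l).modifyHead (fun h => cur.reverse ++ h) := by
  induction fuel with
  | zero => intro l cur acc h; omega
  | succ fuel ih =>
    intro l cur acc h
    cases l with
    | nil =>
      show (cur.reverse :: acc).reverse =
        acc.reverse ++ (List.splitOnP (fun c => c == d) []).modifyHead (fun h => cur.reverse ++ h)
      simp [List.splitOnP_nil]
    | cons c rest =>
      show (if List.isPrefixOf [d] (c :: rest) = true
            then PySem.Chars.splitOn.go [d] fuel (List.drop 1 (c :: rest)) [] (cur.reverse :: acc)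
            else PySem.Chars.splitOn.go [d] fuel rest (c :: cur) acc) =
        acc.reverse ++ (List.splitOnP (fun c => c == d) (c :: rest)).modifyHead (fun h => cur.reverse ++ h)
      have hlen : rest.length < fuel := by simp [List.length_cons] at h; omega
      by_cases hcd : c = d
      · subst hcd
        rw [if_pos (by simp [List.isPrefixOf])]
        rw [show List.drop 1 (c :: rest) = rest from rfl]
        rw [ih rest [] (cur.reverse :: acc) hlen]
        rw [List.splitOnP_cons, if_pos (by simp)]
        simp [pv_modifyHead_id]
      · rw [if_neg (by simp [List.isPrefixOf]; exact fun hh => hcd hh.symm)]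
        rw [ih rest (c :: cur) acc hlen]
        rw [List.splitOnP_cons, if_neg (by simp [hcd]), List.modifyHead_modifyHead]
        have hfun : (fun h => (c :: cur).reverse ++ h) =
            ((fun h => cur.reverse ++ h) ∘ fun h => c :: h) := by
          funext hh; simp
        rw [hfun]

theorem pv_splitOn_single (u : List Char) (d : Char) :
    PySem.Chars.splitOn u [d] = List.splitOnP (fun c => c == d) u := by
  unfold PySem.Chars.splitOn
  rw [pv_go_single d (u.length + 1) u [] [] (by omega)]
  simp [pv_modifyHead_id]

theorem pv_go_crlf (fuel : Nat) :
    ∀ (l cur : List Char) (acc : List (List Char)), l.length < fuel → '\n' ∉ l →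
      PySem.Chars.splitOn.go ['\r', '\n'] fuel l cur acc = acc.reverse ++ [cur.reverse ++ l] := by
  induction fuel with
  | zero => intro l cur acc h _; omega
  | succ fuel ih =>
    intro l cur acc h hn
    cases l with
    | nil =>
      show (cur.reverse :: acc).reverse = acc.reverse ++ [cur.reverse ++ []]
      simp
    | cons c rest =>
      have hpre : List.isPrefixOf ['\r', '\n'] (c :: rest) = false := by
        cases rest with
        | nil => simp [List.isPrefixOf]
        | cons r rest' =>
          have hr : r ≠ '\n' := fun hr => hn (by simp [hr])
          simp only [List.isPrefixOf, Bool.and_eq_false_iff]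
          right
          simp [hr.symm]
      show (if List.isPrefixOf ['\r', '\n'] (c :: rest) = true
            then PySem.Chars.splitOn.go ['\r', '\n'] fuel (List.drop 2 (c :: rest)) [] (cur.reverse :: acc)
            else PySem.Chars.splitOn.go ['\r', '\n'] fuel rest (c :: cur) acc) =
        acc.reverse ++ [cur.reverse ++ (c :: rest)]
      rw [if_neg (by simp [hpre])]
      rw [ih rest (c :: cur) acc (by simp [List.length_cons] at h; omega)
            (fun hm => hn (List.mem_cons_of_mem _ hm))]
      simp

theorem pv_splitOn_crlf_noop (u : List Char) (h : '\n' ∉ u) :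
    PySem.Chars.splitOn u ['\r', '\n'] = [u] := by
  unfold PySem.Chars.splitOn
  rw [pv_go_crlf (u.length + 1) u [] [] (by omega) h]
  simp

-- ---- the crlf pass is the identity on A's intermediate list ----
theorem pv_crlf_stage (P : Char → Bool) (l : List Char) (hP : P '\n' = true) :
    ((pvSF (List.splitOnP P l)).flatMap
        (fun u => ((PySem.Chars.splitOn u ['\r', '\n']).map PySem.Chars.strip).filter (fun x => x ≠ []))) =
      pvSF (List.splitOnP P l) := by
  have hpt : ∀ u ∈ pvSF (List.splitOnP P l),
      ((PySem.Chars.splitOn u ['\r', '\n']).map PySem.Chars.strip).filter (fun x => x ≠ []) = [u] := by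
    intro u hu
    simp only [pvSF, List.mem_filter, List.mem_map] at hu
    obtain ⟨⟨piece, hpm, rfl⟩, hne⟩ := hu
    have hnn : '\n' ∉ piece := by
      intro hmem
      have h2 := (pv_mem_splitOnP P l piece hpm '\n' hmem).2
      rw [hP] at h2
      exact Bool.noConfusion h2
    have hnu : '\n' ∉ PySem.Chars.strip piece := fun hm => hnn (pv_mem_strip piece _ hm)
    rw [pv_splitOn_crlf_noop _ hnu]
    have hne' : PySem.Chars.strip piece ≠ [] := by simpa using hne
    simp [pv_strip_idem, hne']
  rw [List.flatMap_congr hpt]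
  simp

-- ---- A-side assembly ----
theorem pv_pass_flatMap (sep : List Char) (ts : List (List Char)) :
    ts.foldl (fun new_urls url =>
        new_urls ++ (((PySem.Chars.splitOn url sep).map PySem.Chars.strip).filter (fun u => u ≠ []))) [] =
      ts.flatMap (fun url =>
        ((PySem.Chars.splitOn url sep).map PySem.Chars.strip).filter (fun u => u ≠ [])) := by
  rw [PySem.List.foldl_append_eq_flatMap]
  rfl

theorem pv_pass_single (d : Char) (ts : List (List Char)) :
    ts.flatMap (fun url => ((PySem.Chars.splitOn url [d]).map PySem.Chars.strip).filter (fun u => u ≠ [])) =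
      pvStage (fun c => c == d) ts := by
  unfold pvStage pvSF
  simp only [pv_splitOn_single]

theorem pv_A_main (l : List Char) (h : PySem.Chars.strip l ≠ []) :
    (PySem.List.slice
        ((([[','], [';'], ['\n'], ['\r', '\n'], ['|']] : List (List Char)).foldl
              (fun urls sep =>
                urls.foldl
                  (fun new_urls url =>
                    new_urls ++ (((PySem.Chars.splitOn url sep).map PySem.Chars.strip).filter (fun u => u ≠ [])))
                  [])
              [PySem.Chars.strip l]).foldl
          (fun acc url =>
            if (!url.isEmpty && (PySem.Chars.startswith url "http://".toList
                  || PySem.Chars.startswith url "https://".toList)) = true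
            then acc ++ [url] else acc)
          [])
        none (some 10)).map String.ofList = pvCanon l := by
  rw [List.foldl_cons, List.foldl_cons, List.foldl_cons, List.foldl_cons, List.foldl_cons, List.foldl_nil]
  simp only [pv_pass_flatMap, pv_pass_single]
  have h0 : [PySem.Chars.strip l] = pvSF (List.splitOnP (fun _ => false) l) := by
    rw [pv_splitOnP_no_delim _ l (fun c _ => rfl)]
    simp [pvSF, h]
  rw [h0,
    pv_stage_combined (fun _ => false) (fun c => c == ',') (fun c => c == ',') (fun c => rfl) l,
    pv_stage_combined (fun c => c == ',') (fun c => c == ';') (fun c => c == ',' || c == ';') (fun c => rfl) l,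
    pv_stage_combined (fun c => c == ',' || c == ';') (fun c => c == '\n')
      (fun c => c == ',' || c == ';' || c == '\n') (fun c => rfl) l,
    pv_crlf_stage (fun c => c == ',' || c == ';' || c == '\n') l (by decide),
    pv_stage_combined (fun c => c == ',' || c == ';' || c == '\n') (fun c => c == '|') pvDelim
      (fun c => rfl) l]
  rw [PySem.List.foldl_append_if
        (fun url => (!url.isEmpty && (PySem.Chars.startswith url "http://".toList
          || PySem.Chars.startswith url "https://".toList)))
        (fun url => url) _ []]
  rw [List.nil_append]
  have hf : List.map (fun url => url)
        (List.filter (fun url => (!url.isEmpty && (PySem.Chars.startswith url "http://".toList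
            || PySem.Chars.startswith url "https://".toList))) (pvSF (List.splitOnP pvDelim l))) =
      ((List.splitOnP pvDelim l).map PySem.Chars.strip).filter pvValid := by
    rw [List.map_id']
    unfold pvSF
    rw [List.filter_filter]
    apply List.filter_congr
    intro x _
    cases x with
    | nil => decide
    | cons a y => simp [pvValid]
  rw [hf]
  have hsl : PySem.List.slice (((List.splitOnP pvDelim l).map PySem.Chars.strip).filter pvValid) none (some 10) =
      (((List.splitOnP pvDelim l).map PySem.Chars.strip).filter pvValid).take 10 :=
    PySem.List.slice_to _ (by norm_num)
  rw [hsl]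
  rfl

-- ---- B-side assembly ----
theorem pv_delim_iff (c : Char) : (c = ',' ∨ c = ';' ∨ c = '|' ∨ c = '\n') ↔ pvDelim c = true := by
  simp only [pvDelim, Bool.or_eq_true, beq_iff_eq]
  tauto

theorem pv_scan_cons (c : Char) (rest tok : List Char) (out : List String) :
    pyScanTokB (c :: rest) tok out =
      if c = ',' ∨ c = ';' ∨ c = '|' ∨ c = '\n' then
        pyScanTokB rest []
          (if pvValid (PySem.Chars.strip tok) = true ∧ out.length < 10
           then out ++ [String.ofList (PySem.Chars.strip tok)] else out)
      else pyScanTokB rest (tok ++ [c]) out := rfl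

theorem pv_scan_fold (l : List Char) :
    ∀ tok : List Char, (∀ c ∈ tok, pvDelim c = false) → ∀ out : List String,
      pyScanTokB (l ++ [',']) tok out =
        ((List.splitOnP pvDelim (tok ++ l)).map PySem.Chars.strip).foldl
          (fun out t => if pvValid t = true ∧ out.length < 10 then out ++ [String.ofList t] else out) out := by
  induction l with
  | nil =>
    intro tok htok out
    rw [List.nil_append, List.append_nil, pv_splitOnP_no_delim pvDelim tok htok]
    rw [pv_scan_cons, if_pos (Or.inl rfl)]
    rw [List.map_cons, List.map_nil, List.foldl_cons, List.foldl_nil]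
    rfl
  | cons c l' ih =>
    intro tok htok out
    rw [List.cons_append, pv_scan_cons]
    by_cases hd : pvDelim c = true
    · rw [if_pos ((pv_delim_iff c).mpr hd)]
      rw [ih [] (by simp) _]
      rw [List.nil_append, pv_splitOnP_append_delim pvDelim tok l' c htok hd,
          List.map_cons, List.foldl_cons]
    · rw [if_neg (fun hh => hd ((pv_delim_iff c).mp hh))]
      rw [ih (tok ++ [c]) (by
        intro x hx
        rcases List.mem_append.mp hx with hx' | hx'
        · exact htok x hx'
        · have : x = c := by simpa using hx'
          subst this
          exact Bool.eq_false_iff.mpr hd) out]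
      rw [List.append_assoc]
      rfl

theorem pv_fold_take (ts : List (List Char)) :
    ∀ out : List String, out.length ≤ 10 →
      ts.foldl (fun out t => if pvValid t = true ∧ out.length < 10 then out ++ [String.ofList t] else out) out =
        out ++ ((ts.filter pvValid).take (10 - out.length)).map String.ofList := by
  induction ts with
  | nil => intro out _; simp
  | cons t ts ih =>
    intro out h
    rw [List.foldl_cons, List.filter_cons]
    by_cases hv : pvValid t = true
    · rw [if_pos hv]
      by_cases hl : out.length < 10
      · rw [if_pos ⟨hv, hl⟩, ih _ (by simp; omega)]
        have h10 : 10 - out.length = (10 - (out.length + 1)) + 1 := by omega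
        rw [h10, List.take_succ_cons]
        simp
      · have h10 : out.length = 10 := by omega
        rw [if_neg (fun hh => hl hh.2), ih _ h]
        simp [h10]
    · rw [if_neg (fun hh => hv hh.1), if_neg (by simp [hv]), ih _ h]

theorem pv_B_canon (l : List Char) : pyScanTokB (l ++ [',']) [] [] = pvCanon l := by
  rw [pv_scan_fold l [] (by simp) [], pv_fold_take _ [] (by simp)]
  simp [pvCanon]

theorem pv_canon_ws (l : List Char) (h : PySem.Chars.strip l = []) : pvCanon l = [] := by
  have hws := pv_all_ws_of_strip_nil l h
  unfold pvCanon
  have hfil : ((List.splitOnP pvDelim l).map PySem.Chars.strip).filter pvValid = [] := by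
    rw [List.filter_eq_nil_iff]
    intro a ha
    rw [List.mem_map] at ha
    obtain ⟨piece, hpm, rfl⟩ := ha
    have hnilp : PySem.Chars.strip piece = [] :=
      pv_strip_eq_nil piece (fun c hc => hws c (pv_mem_splitOnP pvDelim l piece hpm c hc).1)
    rw [hnilp]
    decide
  rw [hfil]
  rfl

theorem pv_A_some (s : String) :
    parse_image_urls (some s) =
      if s.toList = [] ∨ PySem.Chars.strip s.toList = [] then []
      else
        (PySem.List.slice
            ((([[','], [';'], ['\n'], ['\r', '\n'], ['|']] : List (List Char)).foldl
                  (fun urls sep =>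
                    urls.foldl
                      (fun new_urls url =>
                        new_urls ++ (((PySem.Chars.splitOn url sep).map PySem.Chars.strip).filter (fun u => u ≠ [])))
                      [])
                  [PySem.Chars.strip s.toList]).foldl
              (fun acc url =>
                if (!url.isEmpty && (PySem.Chars.startswith url "http://".toList
                      || PySem.Chars.startswith url "https://".toList)) = true
                then acc ++ [url] else acc)
              [])
            none (some 10)).map String.ofList := rfl

theorem pv_B_some (s : String) :
    parse_image_urls_alt (some s) =
      if s.toList = [] then [] else pyScanTokB (s.toList ++ [',']) [] [] := rfl

-- ===== VERDICT (by name: the statement is the Claim_ definition above) =====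
theorem parse_image_urls_spec : Claim_equal_parse_image_urls := by
  intro images_string _dom
  unfold Spec_parse_image_urls
  cases images_string with
  | none => rfl
  | some s =>
    rw [pv_A_some s, pv_B_some s]
    by_cases h0 : s.toList = []
    · rw [if_pos (Or.inl h0), if_pos h0]
    · by_cases h1 : PySem.Chars.strip s.toList = []
      · rw [if_pos (Or.inr h1), if_neg h0, pv_B_canon, pv_canon_ws _ h1]
      · rw [if_neg (not_or.mpr ⟨h0, h1⟩), if_neg h0, pv_B_canon]
        exact pv_A_main s.toList h1
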